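-- pv_equiv track=rewrite | github.com/AliAnsariArshad/LeetCode | Problems/Easy/String/MinimumMoves.py | minimum_moves3
-- ===== SOURCE A (Python) =====
-- def minimum_moves3(s: str) -> int:
--     result = i = 0
--     while i < len(s):
--         if s[i] == 'X':
--             result += 1
--             i += 3
--         else:
--             i += 1
--     return result
-- ===== SOURCE B (Python) =====
-- def minimum_moves3(s: str) -> int:
--     # dynamic programming over suffixes, filled back-to-front:
--     # dp[i] = minimum moves for s[i:]; dp[i] = 1 + dp[i+3] if s[i]=='X' else dp[i+1]
--     n = len(s)
--     dp = [0] * (n + 3)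
--     for i in range(n - 1, -1, -1):
--         dp[i] = 1 + dp[i + 3] if s[i] == 'X' else dp[i + 1]
--     return dp[0]
-- ===== Notes on version B (the rewrite author's own statement) =====
-- stated objective: alternative
-- what changed: B replaces A's forward jumping-cursor greedy with a back-to-front dynamic-programming table dp[i] = answer for the suffix s[i:] (dp[i] = 1+dp[i+3] if s[i]=='X' else dp[i+1]) and returns dp[0].
import Mathlib
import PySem

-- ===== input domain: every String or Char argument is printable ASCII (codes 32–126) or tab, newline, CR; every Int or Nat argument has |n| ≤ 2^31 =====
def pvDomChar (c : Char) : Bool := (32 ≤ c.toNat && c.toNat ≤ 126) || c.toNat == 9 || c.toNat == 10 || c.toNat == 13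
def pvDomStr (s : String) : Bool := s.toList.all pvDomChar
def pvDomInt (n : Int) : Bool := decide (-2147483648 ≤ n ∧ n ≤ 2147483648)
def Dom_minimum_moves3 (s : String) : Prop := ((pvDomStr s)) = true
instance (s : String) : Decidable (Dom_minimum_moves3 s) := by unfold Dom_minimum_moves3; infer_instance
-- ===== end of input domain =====

-- B replaces A's forward jumping-cursor greedy with a back-to-front DP table over
-- suffixes; proved equal on all inputs.

-- ===== PORT A =====
-- A's while loop over index i: on 'X' count a move and advance i by 3 (drop 2 more
-- chars), else advance by 1. Structural recursion on the remaining suffix.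
def goA : List Char → Int
  | [] => 0
  | c :: rest => if c = 'X' then 1 + goA (List.drop 2 rest) else goA rest
termination_by l => l.length
decreasing_by all_goals simp

def minimum_moves3 (s : String) : Int := goA s.toList

-- ===== PORT B =====
-- B's backwards loop 'for i in range(n-1,-1,-1): dp[i] = 1+dp[i+3] if s[i]=='X' else dp[i+1]'
-- fills the table right-to-left; the state after handling suffix s[i:] is the list
-- dp[i], dp[i+1], …, dp[n+2], so the loop is the foldr that prepends each new entry
-- (indices i+1 and i+3 of the Python array are positions 0 and 2 of the tail state).
def goB : List Char → List Int
  | [] => [0, 0, 0]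
  | c :: rest =>
      let dp := goB rest
      (if c = 'X' then 1 + dp.getD 2 0 else dp.getD 0 0) :: dp

def minimum_moves3_alt (s : String) : Int := (goB s.toList).getD 0 0

-- ===== PRECONDITION & SPEC =====
def Spec_minimum_moves3 (s : String) (out : Int) : Prop := out = minimum_moves3_alt s
instance (s : String) (out : Int) : Decidable (Spec_minimum_moves3 s out) := by unfold Spec_minimum_moves3; infer_instance

-- ===== CLAIM (what is proved, stated in full; the proofs are below) =====
def Claim_equal_minimum_moves3 : Prop := ∀ (s : String), Dom_minimum_moves3 s → Spec_minimum_moves3 s (minimum_moves3 s)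

-- ===== LEMMAS AND PROOFS =====

-- The DP table lists A's answers for every suffix: (goB l)[k] = goA (l.drop k).
theorem goB_getD (l : List Char) : ∀ k : Nat, (goB l).getD k 0 = goA (l.drop k) := by
  induction l with
  | nil => intro k; simp [goB, goA]; cases k with
    | zero => rfl
    | succ k => cases k with
      | zero => rfl
      | succ k => cases k <;> rfl
  | cons c rest ih =>
    intro k
    cases k with
    | zero =>
      have h2 := ih 2; have h0 := ih 0
      simp only [List.getD] at h2 h0
      by_cases hc : c = 'X' <;> simp [goB, goA, hc, h2, h0]
    | succ k => simpa [goB] using ih k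

-- ===== VERDICT (by name: the statement is the Claim_ definition above) =====
theorem minimum_moves3_spec : Claim_equal_minimum_moves3 := by
  intro s _
  unfold Spec_minimum_moves3 minimum_moves3 minimum_moves3_alt
  simpa using (goB_getD s.toList 0).symm
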